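-- pv_equiv track=rewrite | github.com/phmello98-create/odyssey-mood-tracker | odyssey-mcp-server/tools/dependency_manager.py | _categorize_dependency
-- ===== SOURCE A (Python) =====
-- def _categorize_dependency(name: str) -> str:
--     """Categoriza uma dependência"""
--     categories = {
--         "UI": ["fl_chart", "lottie", "flutter_svg", "dynamic_color",
--                "flex_color_scheme", "flutter_staggered_grid_view", "countup"],
--         "State Management": ["flutter_riverpod", "riverpod"],
--         "Navigation": ["go_router"],
--         "Database": ["hive", "hive_flutter", "shared_preferences", "path_provider"],
--         "Firebase": ["firebase_core", "firebase_auth", "cloud_firestore",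
--                     "firebase_storage", "firebase_messaging", "firebase_analytics"],
--         "Notifications": ["awesome_notifications", "timezone"],
--         "Media": ["image_picker", "audioplayers", "just_audio", "media_kit"],
--         "Network": ["http"],
--         "Utils": ["intl", "url_launcher", "uuid", "timeago", "crypto"],
--         "Security": ["flutter_secure_storage", "encrypt"],
--         "Monetization": ["google_mobile_ads", "in_app_purchase"],
--         "Editor": ["appflowy_editor", "flutter_quill"],
--         "Auth": ["google_sign_in"],
--     }
--
--     for category, packages in categories.items():
--         if name in packages:
--             return category
--
--     return "Other"
-- ===== SOURCE B (Python) =====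
-- _CATEGORY_OF = {
--     "fl_chart": "UI", "lottie": "UI", "flutter_svg": "UI", "dynamic_color": "UI",
--     "flex_color_scheme": "UI", "flutter_staggered_grid_view": "UI", "countup": "UI",
--     "flutter_riverpod": "State Management", "riverpod": "State Management",
--     "go_router": "Navigation",
--     "hive": "Database", "hive_flutter": "Database", "shared_preferences": "Database",
--     "path_provider": "Database",
--     "firebase_core": "Firebase", "firebase_auth": "Firebase", "cloud_firestore": "Firebase",
--     "firebase_storage": "Firebase", "firebase_messaging": "Firebase",
--     "firebase_analytics": "Firebase",
--     "awesome_notifications": "Notifications", "timezone": "Notifications",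
--     "image_picker": "Media", "audioplayers": "Media", "just_audio": "Media",
--     "media_kit": "Media",
--     "http": "Network",
--     "intl": "Utils", "url_launcher": "Utils", "uuid": "Utils", "timeago": "Utils",
--     "crypto": "Utils",
--     "flutter_secure_storage": "Security", "encrypt": "Security",
--     "google_mobile_ads": "Monetization", "in_app_purchase": "Monetization",
--     "appflowy_editor": "Editor", "flutter_quill": "Editor",
--     "google_sign_in": "Auth",
-- }
--
--
-- def _categorize_dependency(name: str) -> str:
--     """Categoriza uma dependência"""
--     return _CATEGORY_OF.get(name, "Other")
-- ===== Notes on version B (the rewrite author's own statement) =====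
-- stated objective: simpler
-- what changed: Replaced the loop over category->package-list pairs with repeated membership tests by a single flat package->category dict built once at module level, so the function body is one dict lookup with the fallback category as default.
import Mathlib
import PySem

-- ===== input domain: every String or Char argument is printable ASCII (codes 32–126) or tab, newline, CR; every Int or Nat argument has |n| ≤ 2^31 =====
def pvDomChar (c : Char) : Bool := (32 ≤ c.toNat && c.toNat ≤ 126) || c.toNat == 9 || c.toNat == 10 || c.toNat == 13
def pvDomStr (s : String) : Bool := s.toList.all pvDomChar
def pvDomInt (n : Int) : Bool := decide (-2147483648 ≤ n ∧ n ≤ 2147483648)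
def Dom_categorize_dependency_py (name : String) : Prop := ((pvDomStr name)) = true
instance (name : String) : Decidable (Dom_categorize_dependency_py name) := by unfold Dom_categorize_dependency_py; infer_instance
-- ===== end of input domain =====

-- B replaces A's loop over category→package-list pairs (with a membership test per category)
-- by a single flat package→category dict looked up once with default "Other" (objective: simpler).

-- ===== PORT A =====
-- the literal `categories` dict of A, in insertion order
def pvCategoriesA : List (String × List String) :=
  [ ("UI", ["fl_chart", "lottie", "flutter_svg", "dynamic_color",
            "flex_color_scheme", "flutter_staggered_grid_view", "countup"]),
    ("State Management", ["flutter_riverpod", "riverpod"]),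
    ("Navigation", ["go_router"]),
    ("Database", ["hive", "hive_flutter", "shared_preferences", "path_provider"]),
    ("Firebase", ["firebase_core", "firebase_auth", "cloud_firestore",
                  "firebase_storage", "firebase_messaging", "firebase_analytics"]),
    ("Notifications", ["awesome_notifications", "timezone"]),
    ("Media", ["image_picker", "audioplayers", "just_audio", "media_kit"]),
    ("Network", ["http"]),
    ("Utils", ["intl", "url_launcher", "uuid", "timeago", "crypto"]),
    ("Security", ["flutter_secure_storage", "encrypt"]),
    ("Monetization", ["google_mobile_ads", "in_app_purchase"]),
    ("Editor", ["appflowy_editor", "flutter_quill"]),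
    ("Auth", ["google_sign_in"]) ]

-- A's `for category, packages in categories.items(): if name in packages: return category`
def pvLoopA (name : String) : List (String × List String) → String
  | [] => "Other"
  | (category, packages) :: rest =>
      if packages.contains name then category else pvLoopA name rest

def categorize_dependency_py (name : String) : String :=
  pvLoopA name pvCategoriesA

-- ===== PORT B =====
-- B's module-level flat dict _CATEGORY_OF
def pvCategoryOf : PySem.Dict String String := PySem.Dict.mk
  [ ("fl_chart", "UI"), ("lottie", "UI"), ("flutter_svg", "UI"), ("dynamic_color", "UI"),
    ("flex_color_scheme", "UI"), ("flutter_staggered_grid_view", "UI"), ("countup", "UI"),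
    ("flutter_riverpod", "State Management"), ("riverpod", "State Management"),
    ("go_router", "Navigation"),
    ("hive", "Database"), ("hive_flutter", "Database"), ("shared_preferences", "Database"),
    ("path_provider", "Database"),
    ("firebase_core", "Firebase"), ("firebase_auth", "Firebase"), ("cloud_firestore", "Firebase"),
    ("firebase_storage", "Firebase"), ("firebase_messaging", "Firebase"),
    ("firebase_analytics", "Firebase"),
    ("awesome_notifications", "Notifications"), ("timezone", "Notifications"),
    ("image_picker", "Media"), ("audioplayers", "Media"), ("just_audio", "Media"),
    ("media_kit", "Media"),
    ("http", "Network"),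
    ("intl", "Utils"), ("url_launcher", "Utils"), ("uuid", "Utils"), ("timeago", "Utils"),
    ("crypto", "Utils"),
    ("flutter_secure_storage", "Security"), ("encrypt", "Security"),
    ("google_mobile_ads", "Monetization"), ("in_app_purchase", "Monetization"),
    ("appflowy_editor", "Editor"), ("flutter_quill", "Editor"),
    ("google_sign_in", "Auth") ]

def categorize_dependency_py_alt (name : String) : String :=
  pvCategoryOf.getD name "Other"

-- ===== PRECONDITION & SPEC =====
def Spec_categorize_dependency_py (name : String) (out : String) : Prop := out = categorize_dependency_py_alt name
instance (name : String) (out : String) : Decidable (Spec_categorize_dependency_py name out) := by unfold Spec_categorize_dependency_py; infer_instance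

-- ===== CLAIM (what is proved, stated in full; the proofs are below) =====
def Claim_equal_categorize_dependency_py : Prop := ∀ (name : String), Dom_categorize_dependency_py name → Spec_categorize_dependency_py name (categorize_dependency_py name)

-- ===== LEMMAS AND PROOFS =====

-- flattening a category table into a package→category association list
def pvFlatten (cats : List (String × List String)) : List (String × String) :=
  cats.flatMap (fun p => p.2.map (fun x => (x, p.1)))

theorem pvLookup_append (ps : List String) (c name : String) (rest : List (String × String)) :
    (PySem.Dict.mk (ps.map (fun x => (x, c)) ++ rest)).getD name "Other"
      = if ps.contains name then c else (PySem.Dict.mk rest).getD name "Other" := by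
  induction ps with
  | nil => simp
  | cons p ps ih =>
      simp only [List.map_cons, List.cons_append, List.contains_cons,
        PySem.Dict.getD_eq_get?_getD, PySem.Dict.get?_mk_cons] at *
      by_cases h : p == name
      · simp [h, BEq.symm h]
      · have h' : ¬ (name == p) := fun hc => h (BEq.symm hc)
        simp [h, h', ih]

theorem pvLoop_eq_flat (name : String) (cats : List (String × List String)) :
    pvLoopA name cats = (PySem.Dict.mk (pvFlatten cats)).getD name "Other" := by
  induction cats with
  | nil => simp [pvLoopA, pvFlatten, PySem.Dict.getD_eq_get?_getD, PySem.Dict.get?]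
  | cons hd tl ih =>
      obtain ⟨c, ps⟩ := hd
      simp only [pvLoopA, pvFlatten, List.flatMap_cons, pvLookup_append]
      rw [ih]; rfl

theorem pvFlat_eq : pvFlatten pvCategoriesA = pvCategoryOf.items := by decide

-- ===== VERDICT (by name: the statement is the Claim_ definition above) =====
theorem categorize_dependency_py_spec : Claim_equal_categorize_dependency_py := by
  intro name _
  show categorize_dependency_py name = categorize_dependency_py_alt name
  unfold categorize_dependency_py categorize_dependency_py_alt
  rw [pvLoop_eq_flat, pvFlat_eq]
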